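-- pv_equiv track=rewrite | github.com/BerriAI/litellm | litellm/litellm_core_utils/api_route_to_call_types.py | _route_matches_pattern
-- ===== SOURCE A (Python) =====
-- def _route_matches_pattern(route: str, pattern: str) -> bool:
--     """
--     Return True if the concrete route matches the pattern.
--     Pattern segments like {param} match any single path segment.
--     """
--     route_parts = route.strip("/").split("/")
--     pattern_parts = pattern.strip("/").split("/")
--     if len(route_parts) != len(pattern_parts):
--         return False
--     for r, p in zip(route_parts, pattern_parts):
--         if p.startswith("{") and p.endswith("}"):
--             continue
--         if r != p:
--             return False
--     return True
-- ===== SOURCE B (Python) =====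
-- def _route_matches_pattern(route: str, pattern: str) -> bool:
--     """
--     Return True if the concrete route matches the pattern.
--     Pattern segments like {param} match any single path segment.
--     Single char-level pass: peel one segment at a time with partition("/")
--     from each string; no segment lists are built.
--     """
--     r = route.strip("/")
--     p = pattern.strip("/")
--     while True:
--         rseg, rsep, r = r.partition("/")
--         pseg, psep, p = p.partition("/")
--         if not (pseg.startswith("{") and pseg.endswith("}")) and rseg != pseg:
--             return False
--         if rsep != psep:
--             return False
--         if not rsep:
--             return True
-- ===== Notes on version B (the rewrite author's own statement) =====
-- stated objective: alternative
-- what changed: Replaces A's build-two-segment-lists + length check + zip loop by a single char-level walk that peels one segment at a time from each string with partition('/'), deciding match, separator parity and termination as it goes.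
import Mathlib
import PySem

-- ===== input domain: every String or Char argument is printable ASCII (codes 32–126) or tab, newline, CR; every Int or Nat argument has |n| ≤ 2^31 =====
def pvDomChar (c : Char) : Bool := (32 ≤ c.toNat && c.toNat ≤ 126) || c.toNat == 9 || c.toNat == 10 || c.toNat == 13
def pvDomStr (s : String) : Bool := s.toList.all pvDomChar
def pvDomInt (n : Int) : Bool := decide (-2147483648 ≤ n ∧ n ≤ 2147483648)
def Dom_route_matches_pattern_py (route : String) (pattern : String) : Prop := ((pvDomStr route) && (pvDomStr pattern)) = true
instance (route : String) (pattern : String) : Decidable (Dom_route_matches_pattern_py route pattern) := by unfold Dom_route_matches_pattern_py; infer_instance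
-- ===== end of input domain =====

-- B replaces A's split-into-segment-lists + zip loop by a single char-level walk that
-- peels one segment at a time from each string (objective: alternative, same cost).

-- ===== PORT A =====
-- A's for-loop over zip(route_parts, pattern_parts) with its early 'return False'
def pvLoopA : List (List Char × List Char) → Bool
  | [] => true
  | (r, p) :: rest =>
    if PySem.Chars.startswith p ['{'] && PySem.Chars.endswith p ['}'] then pvLoopA rest
    else if r ≠ p then false
    else pvLoopA rest

def route_matches_pattern_py (route : String) (pattern : String) : Bool :=
  -- route.strip("/").split("/"): strip with an argument is stripChars; split("/") has a
  -- non-empty separator, so PySem.Chars.splitOn (the sep ≠ "" form of str.split) is exact.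
  let route_parts := PySem.Chars.splitOn (PySem.Chars.stripChars route.toList ['/']) ['/']
  let pattern_parts := PySem.Chars.splitOn (PySem.Chars.stripChars pattern.toList ['/']) ['/']
  if route_parts.length ≠ pattern_parts.length then false
  else pvLoopA (route_parts.zip pattern_parts)

-- ===== PORT B =====
-- s.partition("/") for the one-char separator "/": (before, sep-found?, after); hand port,
-- exact for this fixed one-char separator.
def pvPartSlash : List Char → List Char × Bool × List Char
  | [] => ([], false, [])
  | c :: rest =>
    if c = '/' then ([], true, rest)
    else
      let (a, b, r) := pvPartSlash rest
      (c :: a, b, r)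

theorem pvPartSlash_length_lt : ∀ (s : List Char), (pvPartSlash s).2.1 = true →
    (pvPartSlash s).2.2.length < s.length := by
  intro s
  induction s with
  | nil => simp [pvPartSlash]
  | cons c rest ih =>
    by_cases hc : c = '/'
    · simp [pvPartSlash, hc]
    · simpa [pvPartSlash, hc] using fun h => Nat.lt_succ_of_lt (ih h)

-- B's while-loop, one iteration per peeled segment pair
def pvGoB (r p : List Char) : Bool :=
  let rt := pvPartSlash r
  let pt := pvPartSlash p
  if !(PySem.Chars.startswith pt.1 ['{'] && PySem.Chars.endswith pt.1 ['}']) && rt.1 ≠ pt.1 then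
    false
  else if rt.2.1 ≠ pt.2.1 then false
  else if rt.2.1 = false then true
  else pvGoB rt.2.2 pt.2.2
termination_by r.length
decreasing_by
  exact pvPartSlash_length_lt r (Bool.ne_false_iff.mp ‹_›)

def route_matches_pattern_py_alt (route : String) (pattern : String) : Bool :=
  pvGoB (PySem.Chars.stripChars route.toList ['/']) (PySem.Chars.stripChars pattern.toList ['/'])

-- ===== PRECONDITION & SPEC =====
def Spec_route_matches_pattern_py (route : String) (pattern : String) (out : Bool) : Prop := out = route_matches_pattern_py_alt route pattern
instance (route : String) (pattern : String) (out : Bool) : Decidable (Spec_route_matches_pattern_py route pattern out) := by unfold Spec_route_matches_pattern_py; infer_instance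

-- ===== CLAIM (what is proved, stated in full; the proofs are below) =====
def Claim_equal_route_matches_pattern_py : Prop := ∀ (route : String) (pattern : String), Dom_route_matches_pattern_py route pattern → Spec_route_matches_pattern_py route pattern (route_matches_pattern_py route pattern)

-- ===== LEMMAS AND PROOFS =====

-- fuel-free characterization of splitOn on the one-char separator '/'
def pvSplit : List Char → List (List Char)
  | [] => [[]]
  | c :: rest =>
    if c = '/' then [] :: pvSplit rest
    else
      match pvSplit rest with
      | [] => [[c]]
      | h :: t => (c :: h) :: t

theorem pvSplit_ne_nil (l : List Char) : pvSplit l ≠ [] := by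
  cases l with
  | nil => simp [pvSplit]
  | cons c rest =>
    simp only [pvSplit]
    split <;> [simp; split <;> simp]

theorem pvGo_eq (fuel : Nat) : ∀ (l cur : List Char) (accl : List (List Char)),
    l.length ≤ fuel →
    PySem.Chars.splitOn.go ['/'] fuel l cur accl =
      accl.reverse ++
        (match pvSplit l with
         | [] => []
         | h :: t => (cur.reverse ++ h) :: t) := by
  induction fuel with
  | zero =>
    intro l cur accl hl
    have : l = [] := List.eq_nil_of_length_eq_zero (Nat.le_zero.mp hl)
    subst this
    simp [PySem.Chars.splitOn.go, pvSplit]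
  | succ f ih =>
    intro l cur accl hl
    cases l with
    | nil => simp [PySem.Chars.splitOn.go, pvSplit]
    | cons c rest =>
      by_cases hc : c = '/'
      · subst hc
        have hpre : List.isPrefixOf ['/'] ('/' :: rest) = true := by simp [List.isPrefixOf]
        rw [PySem.Chars.splitOn.go]
        simp only [hpre, if_true, List.length_cons] at *
        simp only [List.length_nil, Nat.zero_add, List.drop_succ_cons, List.drop_zero]
        rw [ih rest [] (cur.reverse :: accl) (by omega)]
        rcases h : pvSplit rest with _ | ⟨h1, t1⟩
        · exact absurd h (pvSplit_ne_nil rest)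
        · simp [pvSplit, h]
      · have hpre : List.isPrefixOf ['/'] (c :: rest) = false := by
          simp [List.isPrefixOf]; intro h; exact absurd h.symm hc
        rw [PySem.Chars.splitOn.go]
        simp only [hpre, Bool.false_eq_true, if_false]
        rw [ih rest (c :: cur) accl (by simpa using Nat.le_of_succ_le_succ hl)]
        rcases h : pvSplit rest with _ | ⟨h1, t1⟩
        · exact absurd h (pvSplit_ne_nil rest)
        · simp [pvSplit, hc, h]

theorem pvSplitOn_eq (l : List Char) : PySem.Chars.splitOn l ['/'] = pvSplit l := by
  rw [PySem.Chars.splitOn, pvGo_eq (l.length+1) l [] [] (by omega)]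
  rcases h : pvSplit l with _ | ⟨h1, t1⟩
  · exact absurd h (pvSplit_ne_nil l)
  · simp

theorem pvSplit_part (s : List Char) :
    pvSplit s = if (pvPartSlash s).2.1 then (pvPartSlash s).1 :: pvSplit (pvPartSlash s).2.2
                else [(pvPartSlash s).1] := by
  induction s with
  | nil => simp [pvSplit, pvPartSlash]
  | cons c rest ih =>
    by_cases hc : c = '/'
    · simp [pvSplit, pvPartSlash, hc]
    · rcases hp : pvPartSlash rest with ⟨a, b, r⟩
      rw [hp] at ih
      cases b
      · simp only [if_false, Bool.false_eq_true] at ih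
        simp [pvSplit, pvPartSlash, hc, hp, ih]
      · simp only [if_true] at ih
        simp [pvSplit, pvPartSlash, hc, hp, ih]

-- A's length-check + zip-loop, fused into one structural recursion on the two segment lists
def pvCmpL : List (List Char) → List (List Char) → Bool
  | [], [] => true
  | [], _ :: _ => false
  | _ :: _, [] => false
  | r :: rs, p :: ps =>
    if PySem.Chars.startswith p ['{'] && PySem.Chars.endswith p ['}'] then pvCmpL rs ps
    else if r ≠ p then false
    else pvCmpL rs ps

theorem pvCmpL_eq : ∀ (rs ps : List (List Char)),
    (if rs.length ≠ ps.length then false else pvLoopA (rs.zip ps)) = pvCmpL rs ps := by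
  intro rs
  induction rs with
  | nil => intro ps; cases ps <;> simp [pvCmpL, pvLoopA]
  | cons r rs ih =>
    intro ps
    cases ps with
    | nil => simp [pvCmpL]
    | cons p ps =>
      simp only [List.length_cons, List.zip_cons_cons, pvCmpL, pvLoopA, ne_eq,
        Nat.add_right_cancel_iff]
      by_cases hl : rs.length = ps.length
      · have := ih ps
        rw [if_neg (by simpa using hl)] at this
        simp only [hl, not_true_eq_false, if_false]
        split <;> [exact this; split <;> [rfl; exact this]]
      · have := ih ps
        rw [if_pos (by simpa using hl)] at this
        simp only [hl, not_false_eq_true, if_true]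
        split <;> [exact this; split <;> [rfl; exact this]]

theorem pvGoB_cmpL (r p : List Char) : pvGoB r p = pvCmpL (pvSplit r) (pvSplit p) := by
  fun_induction pvGoB r p with
  | case1 r p rt pt h =>
    simp only [Bool.and_eq_true, Bool.not_eq_true', decide_eq_true_eq] at h
    have hw : (PySem.Chars.startswith (pvPartSlash p).1 ['{'] &&
        PySem.Chars.endswith (pvPartSlash p).1 ['}']) = false := h.1
    have hne : (pvPartSlash r).1 ≠ (pvPartSlash p).1 := h.2
    rw [pvSplit_part r, pvSplit_part p]
    cases (pvPartSlash r).2.1 <;> cases (pvPartSlash p).2.1 <;> simp [pvCmpL, hw, hne]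
  | case2 r p rt pt h1 h2 =>
    have h2' : (pvPartSlash r).2.1 ≠ (pvPartSlash p).2.1 := h2
    rw [pvSplit_part r, pvSplit_part p]
    have hr := pvSplit_ne_nil (pvPartSlash r).2.2
    have hp := pvSplit_ne_nil (pvPartSlash p).2.2
    cases hrb : (pvPartSlash r).2.1 <;> cases hpb : (pvPartSlash p).2.1
    · exact absurd (hrb.trans hpb.symm) h2'
    · rcases hs : pvSplit (pvPartSlash p).2.2 with _ | ⟨x, xs⟩
      · exact absurd hs hp
      · simp only [if_false, if_true, Bool.false_eq_true, pvCmpL]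
        split <;> [rfl; split <;> [rfl; rfl]]
    · rcases hs : pvSplit (pvPartSlash r).2.2 with _ | ⟨x, xs⟩
      · exact absurd hs hr
      · simp only [if_false, if_true, Bool.false_eq_true, pvCmpL]
        split <;> [rfl; split <;> [rfl; rfl]]
    · exact absurd (hrb.trans hpb.symm) h2'
  | case3 r p rt pt h1 h2 h3 =>
    have hrb : (pvPartSlash r).2.1 = false := h3
    have hpb : (pvPartSlash p).2.1 = false := by rw [← not_ne_iff.mp h2]; exact h3
    rw [pvSplit_part r, pvSplit_part p, hrb, hpb]
    simp only [Bool.and_eq_true, Bool.not_eq_true', decide_eq_true_eq, not_and] at h1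
    simp only [if_false, Bool.false_eq_true, pvCmpL]
    by_cases hw : (PySem.Chars.startswith (pvPartSlash p).1 ['{'] &&
        PySem.Chars.endswith (pvPartSlash p).1 ['}']) = true
    · simp [hw]
    · have heq : (pvPartSlash r).1 = (pvPartSlash p).1 :=
        not_ne_iff.mp (h1 (by simpa using hw))
      simp [hw, heq]
  | case4 r p rt pt h1 h2 h3 ih =>
    have hrb : (pvPartSlash r).2.1 = true := Bool.ne_false_iff.mp h3
    have hpb : (pvPartSlash p).2.1 = true := by rw [← not_ne_iff.mp h2]; exact hrb
    rw [pvSplit_part r, pvSplit_part p, hrb, hpb]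
    simp only [Bool.and_eq_true, Bool.not_eq_true', decide_eq_true_eq, not_and] at h1
    simp only [if_true, pvCmpL]
    rw [ih]
    by_cases hw : (PySem.Chars.startswith (pvPartSlash p).1 ['{'] &&
        PySem.Chars.endswith (pvPartSlash p).1 ['}']) = true
    · simp only [hw, if_true]
      rfl
    · have heq : (pvPartSlash r).1 = (pvPartSlash p).1 :=
        not_ne_iff.mp (h1 (by simpa using hw))
      simp only [hw, Bool.false_eq_true, if_false, heq, ne_eq, not_true_eq_false]
      rfl

theorem pvGoB_eq (r p : List Char) :
    pvGoB r p =
      (if (pvSplit r).length ≠ (pvSplit p).length then false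
       else pvLoopA ((pvSplit r).zip (pvSplit p))) := by
  rw [pvCmpL_eq, pvGoB_cmpL]

-- ===== VERDICT (by name: the statement is the Claim_ definition above) =====
theorem route_matches_pattern_py_spec : Claim_equal_route_matches_pattern_py := by
  intro route pattern _
  unfold Spec_route_matches_pattern_py route_matches_pattern_py route_matches_pattern_py_alt
  rw [pvSplitOn_eq, pvSplitOn_eq, pvGoB_eq]
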